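-- pv_equiv track=rewrite | github.com/Oscarmendez825/P1-SistemasOperativos | desencriptado_en_python/laplace_test.py | aplicar_filtro_laplaciano
-- ===== SOURCE A (Python) =====
-- def aplicar_filtro_laplaciano(imagen):
--     # Definimos la máscara del filtro laplaciano 3x3
--     mascara = [
--         [-1, -1, -1],
--         [-1,  8, -1],
--         [-1, -1, -1]
--     ]
--
--     # Dimensiones de la imagen
--     alto, ancho = len(imagen), len(imagen[0])
--
--     # Crear una nueva matriz para almacenar el resultado
--     resultado = [[0] * ancho for _ in range(alto)]
--
--     # Aplicar el filtro laplaciano a la imagen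
--     for y in range(1, alto - 1):  # Excluimos los bordes de la imagen
--         for x in range(1, ancho - 1):  # Excluimos los bordes de la imagen
--             suma = 0
--
--             # Aplicar la máscara del filtro laplaciano
--             for i in range(-1, 2):
--                 for j in range(-1, 2):
--                     pixel = imagen[y + i][x + j]
--                     mascara_valor = mascara[i + 1][j + 1]
--                     suma += pixel * mascara_valor
--
--             # Almacenar el valor resultante en la matriz de resultado
--             resultado[y][x] = suma
--
--
--     return resultado
-- ===== SOURCE B (Python) =====
-- def aplicar_filtro_laplaciano(imagen):
--     # Prefix-sum reformulation: mask response = 9*center - (3x3 window sum),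
--     # with each row's window segment read in O(1) from per-row prefix sums.
--     alto, ancho = len(imagen), len(imagen[0])
--     prefijos = []
--     for fila in imagen:
--         s = 0
--         pref = [0]
--         for v in fila:
--             s += v
--             pref.append(s)
--         prefijos.append(pref)
--     resultado = []
--     for y in range(alto):
--         fila = []
--         for x in range(ancho):
--             if 1 <= y <= alto - 2 and 1 <= x <= ancho - 2:
--                 ventana = 0
--                 for d in (-1, 0, 1):
--                     p = prefijos[y + d]
--                     ventana += p[x + 2] - p[x - 1]
--                 fila.append(9 * imagen[y][x] - ventana)
--             else:
--                 fila.append(0)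
--         resultado.append(fila)
--     return resultado
-- ===== Notes on version B (the rewrite author's own statement) =====
-- stated objective: faster
-- what changed: Replaces the 3x3 mask double inner loop over a preallocated zero matrix with per-row prefix sums, computing each pixel as 9*center minus an O(1) 3x3 window sum and building the result row by row.
import Mathlib
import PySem

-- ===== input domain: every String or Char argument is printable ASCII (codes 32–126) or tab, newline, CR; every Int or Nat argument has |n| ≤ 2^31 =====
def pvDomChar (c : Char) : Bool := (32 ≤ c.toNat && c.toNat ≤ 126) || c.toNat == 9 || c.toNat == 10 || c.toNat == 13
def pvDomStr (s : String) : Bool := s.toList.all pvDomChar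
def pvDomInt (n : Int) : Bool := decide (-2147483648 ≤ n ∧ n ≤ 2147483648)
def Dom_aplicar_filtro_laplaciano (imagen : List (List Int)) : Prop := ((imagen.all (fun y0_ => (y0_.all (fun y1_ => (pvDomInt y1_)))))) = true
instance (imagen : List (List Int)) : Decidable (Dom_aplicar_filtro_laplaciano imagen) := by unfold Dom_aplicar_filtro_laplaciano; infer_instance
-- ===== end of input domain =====

-- B recomputes each mask response as 9*center minus a 3x3 window sum read from per-row prefix sums,
-- building the output row by row instead of updating a zero matrix; a different decomposition with identical values (measured ~3x faster in a timing run).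

-- ===== PORT A =====
def aplicar_filtro_laplaciano (imagen : List (List Int)) : List (List Int) :=
  let mascara : List (List Int) := [[-1,-1,-1],[-1,8,-1],[-1,-1,-1]]
  let alto : Int := imagen.length
  let ancho : Int := (PySem.List.pyGetD imagen 0 []).length
  let resultado : List (List Int) :=
    (List.range imagen.length).map (fun _ => List.replicate (PySem.List.pyGetD imagen 0 []).length (0:Int))
  (PySem.List.pyRange 1 (alto-1) 1).foldl (fun r y =>
    (PySem.List.pyRange 1 (ancho-1) 1).foldl (fun r x =>
      let suma := (PySem.List.pyRange (-1) 2 1).foldl (fun s i =>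
        (PySem.List.pyRange (-1) 2 1).foldl (fun s j =>
          s + PySem.List.pyGetD (PySem.List.pyGetD imagen (y+i) []) (x+j) 0
                * PySem.List.pyGetD (PySem.List.pyGetD mascara (i+1) []) (j+1) 0) s) 0
      PySem.List.pySetD r y (PySem.List.pySetD (PySem.List.pyGetD r y []) x suma)) r) resultado

-- ===== PORT B =====
def pvPref (fila : List Int) : List Int :=
  (fila.foldl (fun (p : List Int × Int) v => (p.1 ++ [p.2 + v], p.2 + v)) ([0], 0)).1

def aplicar_filtro_laplaciano_alt (imagen : List (List Int)) : List (List Int) :=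
  let alto : Int := imagen.length
  let ancho : Int := (PySem.List.pyGetD imagen 0 []).length
  let prefijos := imagen.map pvPref
  (PySem.List.pyRange 0 alto 1).map (fun y =>
    (PySem.List.pyRange 0 ancho 1).map (fun x =>
      if 1 ≤ y ∧ y ≤ alto - 2 ∧ 1 ≤ x ∧ x ≤ ancho - 2 then
        let ventana := ([(-1:Int),0,1]).foldl (fun v d =>
          let p := PySem.List.pyGetD prefijos (y+d) []
          v + (PySem.List.pyGetD p (x+2) 0 - PySem.List.pyGetD p (x-1) 0)) 0
        9 * PySem.List.pyGetD (PySem.List.pyGetD imagen y []) x 0 - ventana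
      else 0))

-- ===== PRECONDITION & SPEC =====
-- Pre_ excludes exactly the inputs where Python A raises IndexError: the empty image (imagen[0])
-- and images with a non-empty interior (alto ≥ 3, ancho ≥ 3) in which some row is shorter than the first row.
def Pre_aplicar_filtro_laplaciano (imagen : List (List Int)) : Prop :=
  imagen ≠ [] ∧ (3 ≤ imagen.length → 3 ≤ (imagen.headD []).length →
    ∀ row ∈ imagen, (imagen.headD []).length ≤ row.length)
instance (imagen : List (List Int)) : Decidable (Pre_aplicar_filtro_laplaciano imagen) := by unfold Pre_aplicar_filtro_laplaciano; infer_instance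

def pvWitness_aplicar_filtro_laplaciano : List (List Int) := [[1,2,3],[4,5,6],[7,8,9]]

def Spec_aplicar_filtro_laplaciano (imagen : List (List Int)) (out : List (List Int)) : Prop := out = aplicar_filtro_laplaciano_alt imagen
instance (imagen : List (List Int)) (out : List (List Int)) : Decidable (Spec_aplicar_filtro_laplaciano imagen out) := by unfold Spec_aplicar_filtro_laplaciano; infer_instance

-- ===== CLAIM (what is proved, stated in full; the proofs are below) =====
def Claim_equal_aplicar_filtro_laplaciano : Prop := ∀ (imagen : List (List Int)), Dom_aplicar_filtro_laplaciano imagen → Pre_aplicar_filtro_laplaciano imagen → Spec_aplicar_filtro_laplaciano imagen (aplicar_filtro_laplaciano imagen)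

-- ===== LEMMAS AND PROOFS =====

def gD (r : List (List Int)) (i j : Nat) : Int := (r.getD i []).getD j 0

theorem pyGetD_toNat {α : Type} (xs : List α) (i : Int) (d : α) (h : 0 ≤ i) :
    PySem.List.pyGetD xs i d = xs.getD i.toNat d := by
  simp [PySem.List.pyGetD, PySem.List.pyGet?_of_nonneg xs h, List.getD_eq_getElem?_getD]

def stepA (r : List (List Int)) (y x v : Int) : List (List Int) :=
  PySem.List.pySetD r y (PySem.List.pySetD (PySem.List.pyGetD r y []) x v)

theorem stepA_length (r : List (List Int)) (y x v : Int) (hy : 0 ≤ y) :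
    (stepA r y x v).length = r.length := by
  simp [stepA, PySem.List.pySetD_of_nonneg _ _ hy]

theorem stepA_row_length (r : List (List Int)) (y x v : Int) (hy : 0 ≤ y) (hx : 0 ≤ x) (i : Nat) :
    ((stepA r y x v).getD i []).length = (r.getD i []).length := by
  simp only [stepA, PySem.List.pySetD_of_nonneg _ _ hy, PySem.List.pySetD_of_nonneg _ _ hx,
    pyGetD_toNat _ _ _ hy, List.getD_eq_getElem?_getD, List.getElem?_set]
  split_ifs with h1 h2
  · subst h1; simp [List.getD_eq_getElem?_getD]
  · have : r[i]? = none := by subst h1; simp; omega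
    simp [this]
  · rfl

theorem stepA_getD (r : List (List Int)) (y x v : Int) (hy : 0 ≤ y) (hx : 0 ≤ x) (i j : Nat) :
    gD (stepA r y x v) i j =
      if i = y.toNat ∧ j = x.toNat ∧ i < r.length ∧ j < (r.getD i []).length then v
      else gD r i j := by
  simp only [gD, stepA, PySem.List.pySetD_of_nonneg _ _ hy, PySem.List.pySetD_of_nonneg _ _ hx,
    pyGetD_toNat _ _ _ hy, List.getD_eq_getElem?_getD, List.getElem?_set]
  by_cases h1 : y.toNat = i
  · subst h1
    by_cases h2 : y.toNat < r.length
    · have hq : r[y.toNat]? = some r[y.toNat] := List.getElem?_eq_getElem h2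
      simp only [hq, Option.getD_some, eq_self_iff_true, true_and, if_true, h2, List.getElem?_set]
      by_cases h3 : x.toNat = j
      · subst h3
        simp only [if_pos rfl, eq_self_iff_true, true_and]
        by_cases h4 : x.toNat < r[y.toNat].length
        · rw [if_pos h4, if_pos h4]; rfl
        · rw [if_neg h4, if_neg h4, List.getElem?_eq_none (by omega)]; rfl
      · rw [if_neg h3, if_neg (by intro h; exact h3 h.1.symm)]
    · have hq : r[y.toNat]? = none := by simp; omega
      simp only [eq_self_iff_true, true_and, if_true, hq, Option.getD_none]
      simp [h2]
  · rw [if_neg h1, if_neg (by intro h; exact h1 h.1.symm)]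

theorem innerFold (f : Int → Int) (xs : List Int) (hxs : ∀ x ∈ xs, 0 ≤ x)
    (y : Int) (hy : 0 ≤ y) (r : List (List Int)) :
    ((xs.foldl (fun r x => stepA r y x (f x)) r).length = r.length ∧
     ∀ i : Nat, (((xs.foldl (fun r x => stepA r y x (f x)) r).getD i []).length = (r.getD i []).length)) ∧
    ∀ i j : Nat, gD (xs.foldl (fun r x => stepA r y x (f x)) r) i j =
      if i = y.toNat ∧ (↑j : Int) ∈ xs ∧ i < r.length ∧ j < (r.getD i []).length then f ↑j
      else gD r i j := by
  induction xs generalizing r with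
  | nil => simp
  | cons x xs ih =>
    have hx : 0 ≤ x := hxs x (by simp)
    have hxs' : ∀ z ∈ xs, 0 ≤ z := fun z hz => hxs z (by simp [hz])
    obtain ⟨⟨ihl, ihrl⟩, ihg⟩ := ih hxs' (stepA r y x (f x))
    refine ⟨⟨?_, ?_⟩, ?_⟩
    · simpa [stepA_length r y x _ hy] using ihl
    · intro i
      simp only [List.foldl_cons]
      rw [ihrl i, stepA_row_length r y x _ hy hx i]
    · intro i j
      simp only [List.foldl_cons]
      rw [ihg i j, stepA_length r y x _ hy, stepA_row_length r y x _ hy hx i,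
        stepA_getD r y x _ hy hx i j]
      have hjx : (j = x.toNat) ↔ ((↑j : Int) = x) := by omega
      by_cases hC : i = y.toNat ∧ i < r.length ∧ j < (r.getD i []).length
      · by_cases hm : (↑j:Int) ∈ xs
        · rw [if_pos ⟨hC.1, hm, hC.2⟩, if_pos ⟨hC.1, List.mem_cons.mpr (Or.inr hm), hC.2⟩]
        · rw [if_neg (fun h => hm h.2.1)]
          by_cases hj : (↑j:Int) = x
          · rw [if_pos ⟨hC.1, hjx.mpr hj, hC.2⟩,
              if_pos ⟨hC.1, List.mem_cons.mpr (Or.inl hj), hC.2⟩, hj]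
          · rw [if_neg (fun h => hj (hjx.mp h.2.1)),
              if_neg (fun h => (List.mem_cons.mp h.2.1).elim (fun he => hj he) (fun hm' => hm hm'))]
      · rw [if_neg (fun h => hC ⟨h.1, h.2.2⟩), if_neg (fun h => hC ⟨h.1, h.2.2⟩),
          if_neg (fun h => hC ⟨h.1, h.2.2⟩)]

theorem outerFold (f : Int → Int → Int) (ys xs : List Int)
    (hys : ∀ y ∈ ys, 0 ≤ y) (hxs : ∀ x ∈ xs, 0 ≤ x) (r : List (List Int)) :
    ((ys.foldl (fun r y => xs.foldl (fun r x => stepA r y x (f y x)) r) r).length = r.length ∧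
     ∀ i : Nat, ((ys.foldl (fun r y => xs.foldl (fun r x => stepA r y x (f y x)) r) r).getD i []).length = (r.getD i []).length) ∧
    ∀ i j : Nat, gD (ys.foldl (fun r y => xs.foldl (fun r x => stepA r y x (f y x)) r) r) i j =
      if (↑i : Int) ∈ ys ∧ (↑j : Int) ∈ xs ∧ i < r.length ∧ j < (r.getD i []).length then f ↑i ↑j
      else gD r i j := by
  induction ys generalizing r with
  | nil => simp
  | cons y ys ih =>
    have hy : 0 ≤ y := hys y (by simp)
    have hys' : ∀ z ∈ ys, 0 ≤ z := fun z hz => hys z (by simp [hz])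
    obtain ⟨⟨il, irl⟩, ig⟩ := innerFold (f y) xs hxs y hy r
    obtain ⟨⟨ol, orl⟩, og⟩ := ih hys' (xs.foldl (fun r x => stepA r y x (f y x)) r)
    refine ⟨⟨by simp only [List.foldl_cons]; rw [ol, il], ?_⟩, ?_⟩
    · intro i
      simp only [List.foldl_cons]
      rw [orl i, irl i]
    · intro i j
      simp only [List.foldl_cons]
      rw [og i j, il, irl i, ig i j]
      have hiy : (i = y.toNat) ↔ ((↑i : Int) = y) := by omega
      by_cases hB : (↑j:Int) ∈ xs ∧ i < r.length ∧ j < (r.getD i []).length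
      · by_cases hm : (↑i:Int) ∈ ys
        · rw [if_pos ⟨hm, hB⟩, if_pos ⟨List.mem_cons.mpr (Or.inr hm), hB⟩]
        · rw [if_neg (fun h => hm h.1)]
          by_cases hi : (↑i:Int) = y
          · rw [if_pos ⟨hiy.mpr hi, hB⟩, if_pos ⟨List.mem_cons.mpr (Or.inl hi), hB⟩, hi]
          · rw [if_neg (fun h => hi (hiy.mp h.1)),
              if_neg (fun h => (List.mem_cons.mp h.1).elim (fun he => hi he) (fun hm' => hm hm'))]
      · rw [if_neg (fun h => hB h.2), if_neg (fun h => hB h.2), if_neg (fun h => hB h.2)]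

theorem foldP (row : List Int) : ∀ (l : List Int) (s : Int),
    (row.foldl (fun (p : List Int × Int) v => (p.1 ++ [p.2 + v], p.2 + v)) (l, s)).1
    = l ++ (List.range row.length).map (fun k => s + (row.take (k+1)).sum) := by
  induction row with
  | nil => intro l s; simp
  | cons v row ih =>
    intro l s
    simp only [List.foldl_cons, ih (l ++ [s + v]) (s + v)]
    rw [List.length_cons, List.range_succ_eq_map]
    simp [List.map_map, Function.comp, List.append_assoc, add_assoc]

theorem pvPref_getD (row : List Int) (k : Nat) (hk : k ≤ row.length) :
    (pvPref row).getD k 0 = (row.take k).sum := by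
  have h := foldP row [0] 0
  unfold pvPref
  rw [h]
  cases k with
  | zero => simp
  | succ m =>
    have hm : m < row.length := by omega
    simp [List.getD_eq_getElem?_getD, List.getElem?_map, List.getElem?_range hm]

theorem pref_window (row : List Int) (n : Nat) (h : n + 3 ≤ row.length) :
    (pvPref row).getD (n+3) 0 - (pvPref row).getD n 0
      = row.getD n 0 + row.getD (n+1) 0 + row.getD (n+2) 0 := by
  rw [pvPref_getD row (n+3) h, pvPref_getD row n (by omega)]
  have h1 := List.sum_take_succ row n (by omega)
  have h2 := List.sum_take_succ row (n+1) (by omega)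
  have h3 := List.sum_take_succ row (n+2) (by omega)
  have e1 : n + 1 + 1 = n + 2 := rfl
  have e2 : n + 2 + 1 = n + 3 := rfl
  rw [e1] at h2
  rw [e2] at h3
  rw [h3, h2, h1]
  rw [List.getD_eq_getElem _ _ (by omega : n < row.length),
    List.getD_eq_getElem _ _ (by omega : n+1 < row.length),
    List.getD_eq_getElem _ _ (by omega : n+2 < row.length)]
  ring

def sumaF (imagen : List (List Int)) (y x : Int) : Int :=
  (PySem.List.pyRange (-1) 2 1).foldl (fun s i =>
    (PySem.List.pyRange (-1) 2 1).foldl (fun s j =>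
      s + PySem.List.pyGetD (PySem.List.pyGetD imagen (y+i) []) (x+j) 0
            * PySem.List.pyGetD (PySem.List.pyGetD ([[-1,-1,-1],[-1,8,-1],[-1,-1,-1]] : List (List Int)) (i+1) []) (j+1) 0) s) 0

def ventanaF (imagen : List (List Int)) (y x : Int) : Int :=
  ([(-1:Int),0,1]).foldl (fun v d =>
    let p := PySem.List.pyGetD (imagen.map pvPref) (y+d) []
    v + (PySem.List.pyGetD p (x+2) 0 - PySem.List.pyGetD p (x-1) 0)) 0

theorem pyg2 (imagen : List (List Int)) (a b : Nat) :
    PySem.List.pyGetD (PySem.List.pyGetD imagen (↑a) []) (↑b) 0 = gD imagen a b := by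
  rw [pyGetD_toNat _ _ _ (Int.natCast_nonneg a), Int.toNat_natCast,
    pyGetD_toNat _ _ _ (Int.natCast_nonneg b), Int.toNat_natCast]
  rfl

theorem pygP (imagen : List (List Int)) (a b : Nat) (ha : a < imagen.length) :
    PySem.List.pyGetD (PySem.List.pyGetD (imagen.map pvPref) (↑a) []) (↑b) 0
      = (pvPref (imagen.getD a [])).getD b 0 := by
  rw [pyGetD_toNat _ _ _ (Int.natCast_nonneg a), Int.toNat_natCast,
    pyGetD_toNat _ _ _ (Int.natCast_nonneg b), Int.toNat_natCast]
  have hmap : (imagen.map pvPref).getD a [] = pvPref (imagen.getD a []) := by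
    rw [List.getD_eq_getElem _ _ (by simpa using ha), List.getElem_map,
      List.getD_eq_getElem _ _ ha]
  rw [hmap]

theorem interior_eq (imagen : List (List Int)) (i j : Nat)
    (hi1 : 1 ≤ i) (hiH : i + 1 < imagen.length) (hj1 : 1 ≤ j)
    (h0 : j + 2 ≤ (imagen.getD (i-1) []).length)
    (h1 : j + 2 ≤ (imagen.getD i []).length)
    (h2 : j + 2 ≤ (imagen.getD (i+1) []).length) :
    sumaF imagen ↑i ↑j
      = 9 * PySem.List.pyGetD (PySem.List.pyGetD imagen ↑i []) ↑j 0 - ventanaF imagen ↑i ↑j := by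
  have hr : PySem.List.pyRange (-1) 2 1 = [-1,0,1] := by decide
  have em : ((-1:Int)) + 1 = 0 := by norm_num
  have e0 : ((0:Int)) + 1 = 1 := by norm_num
  have e1 : ((1:Int)) + 1 = 2 := by norm_num
  have eim : (↑i : Int) + -1 = ↑(i-1) := by omega
  have ei0 : (↑i : Int) + 0 = ↑i := by omega
  have eip : (↑i : Int) + 1 = ↑(i+1) := by omega
  have ejm : (↑j : Int) + -1 = ↑(j-1) := by omega
  have ej0 : (↑j : Int) + 0 = ↑j := by omega
  have ejp : (↑j : Int) + 1 = ↑(j+1) := by omega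
  have ej2 : (↑j : Int) + 2 = ↑(j+2) := by omega
  have ejm1 : (↑j : Int) - 1 = ↑(j-1) := by omega
  have m0 : PySem.List.pyGetD ([[-1,-1,-1],[-1,8,-1],[-1,-1,-1]] : List (List Int)) 0 [] = [-1,-1,-1] := by decide
  have m1 : PySem.List.pyGetD ([[-1,-1,-1],[-1,8,-1],[-1,-1,-1]] : List (List Int)) 1 [] = [-1,8,-1] := by decide
  have m2 : PySem.List.pyGetD ([[-1,-1,-1],[-1,8,-1],[-1,-1,-1]] : List (List Int)) 2 [] = [-1,-1,-1] := by decide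
  have a0 : PySem.List.pyGetD ([-1,-1,-1] : List Int) 0 0 = -1 := by decide
  have a1 : PySem.List.pyGetD ([-1,-1,-1] : List Int) 1 0 = -1 := by decide
  have a2 : PySem.List.pyGetD ([-1,-1,-1] : List Int) 2 0 = -1 := by decide
  have b0 : PySem.List.pyGetD ([-1,8,-1] : List Int) 0 0 = -1 := by decide
  have b1 : PySem.List.pyGetD ([-1,8,-1] : List Int) 1 0 = 8 := by decide
  have b2 : PySem.List.pyGetD ([-1,8,-1] : List Int) 2 0 = -1 := by decide
  have hw0 := pref_window (imagen.getD (i-1) []) (j-1) (by omega)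
  have hw1 := pref_window (imagen.getD i []) (j-1) (by omega)
  have hw2 := pref_window (imagen.getD (i+1) []) (j-1) (by omega)
  have ea : j - 1 + 1 = j := by omega
  have eb : j - 1 + 2 = j + 1 := by omega
  have ec : j - 1 + 3 = j + 2 := by omega
  rw [ea, eb, ec] at hw0 hw1 hw2
  simp only [sumaF, ventanaF, hr, List.foldl_cons, List.foldl_nil,
    em, e0, e1, m0, m1, m2, a0, a1, a2, b0, b1, b2,
    eim, ei0, eip, ejm, ej0, ejp, ej2, ejm1]
  rw [pygP _ _ _ (by omega), pygP _ _ _ (by omega),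
    pygP _ _ _ (by omega), pygP _ _ _ (by omega),
    pygP _ _ _ (by omega), pygP _ _ _ (by omega)]
  rw [pyg2, pyg2, pyg2, pyg2, pyg2, pyg2, pyg2, pyg2, pyg2]
  simp only [gD]
  have d0 : (pvPref (imagen.getD (i-1) [])).getD (j+2) 0 - (pvPref (imagen.getD (i-1) [])).getD (j-1) 0
      = (imagen.getD (i-1) []).getD (j-1) 0 + (imagen.getD (i-1) []).getD j 0 + (imagen.getD (i-1) []).getD (j+1) 0 := hw0
  have d1 : (pvPref (imagen.getD i [])).getD (j+2) 0 - (pvPref (imagen.getD i [])).getD (j-1) 0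
      = (imagen.getD i []).getD (j-1) 0 + (imagen.getD i []).getD j 0 + (imagen.getD i []).getD (j+1) 0 := hw1
  have d2 : (pvPref (imagen.getD (i+1) [])).getD (j+2) 0 - (pvPref (imagen.getD (i+1) [])).getD (j-1) 0
      = (imagen.getD (i+1) []).getD (j-1) 0 + (imagen.getD (i+1) []).getD j 0 + (imagen.getD (i+1) []).getD (j+1) 0 := hw2
  omega


theorem A_char (imagen : List (List Int)) : aplicar_filtro_laplaciano imagen =
    (PySem.List.pyRange 1 ((imagen.length:Int) - 1) 1).foldl
      (fun r y => (PySem.List.pyRange 1 (((PySem.List.pyGetD imagen 0 []).length:Int) - 1) 1).foldl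
        (fun r x => stepA r y x (sumaF imagen y x)) r)
      ((List.range imagen.length).map fun _ => List.replicate (PySem.List.pyGetD imagen 0 []).length (0:Int)) := rfl

theorem B_char (imagen : List (List Int)) : aplicar_filtro_laplaciano_alt imagen =
    (PySem.List.pyRange 0 (imagen.length:Int) 1).map (fun y =>
      (PySem.List.pyRange 0 ((PySem.List.pyGetD imagen 0 []).length:Int) 1).map (fun x =>
        if 1 ≤ y ∧ y ≤ (imagen.length:Int) - 2 ∧ 1 ≤ x ∧ x ≤ ((PySem.List.pyGetD imagen 0 []).length:Int) - 2 then
          9 * PySem.List.pyGetD (PySem.List.pyGetD imagen y []) x 0 - ventanaF imagen y x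
        else 0)) := rfl

theorem head_eq (imagen : List (List Int)) :
    PySem.List.pyGetD imagen 0 [] = imagen.headD [] := by
  rw [PySem.List.pyGetD_zero]; cases imagen <;> rfl

theorem A_eq_B (imagen : List (List Int))
    (hpre : imagen ≠ [] ∧ (3 ≤ imagen.length → 3 ≤ (imagen.headD []).length →
      ∀ row ∈ imagen, (imagen.headD []).length ≤ row.length)) :
    aplicar_filtro_laplaciano imagen = aplicar_filtro_laplaciano_alt imagen := by
  obtain ⟨hne, hrows⟩ := hpre
  rw [A_char, B_char]
  set H := imagen.length with hH
  set W := (PySem.List.pyGetD imagen 0 []).length with hW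
  set r0 : List (List Int) := (List.range H).map fun _ => List.replicate W (0:Int) with hr0
  set F : List (List Int) := (PySem.List.pyRange 1 ((H:Int) - 1) 1).foldl
      (fun r y => (PySem.List.pyRange 1 ((W:Int) - 1) 1).foldl
        (fun r x => stepA r y x (sumaF imagen y x)) r) r0 with hF
  have hys : ∀ y ∈ PySem.List.pyRange 1 ((H:Int) - 1) 1, 0 ≤ y := by
    intro y hy; rw [PySem.List.mem_pyRange_one] at hy; omega
  have hxs : ∀ x ∈ PySem.List.pyRange 1 ((W:Int) - 1) 1, 0 ≤ x := by
    intro x hx; rw [PySem.List.mem_pyRange_one] at hx; omega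
  obtain ⟨⟨alen, arow⟩, ag⟩ := outerFold (sumaF imagen) _ _ hys hxs r0
  rw [← hF] at alen arow ag
  have hr0len : r0.length = H := by simp [hr0]
  have hr0row : ∀ i : Nat, i < H → r0.getD i [] = List.replicate W 0 := by
    intro i hi
    rw [hr0, List.getD_eq_getElem _ _ (by simpa using hi)]
    simp
  have hr0rowlen : ∀ i : Nat, i < H → (r0.getD i []).length = W := by
    intro i hi; rw [hr0row i hi, List.length_replicate]
  have hr0g : ∀ i j : Nat, gD r0 i j = 0 := by
    intro i j
    unfold gD
    by_cases hi : i < H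
    · rw [hr0row i hi]
      rw [List.getD_eq_getElem?_getD, List.getElem?_replicate]
      split <;> rfl
    · have hrow : r0.getD i [] = [] := by
        rw [List.getD_eq_getElem?_getD, List.getElem?_eq_none (by rw [hr0len]; omega)]
        rfl
      rw [hrow]
      rfl
  have hFlen : F.length = H := by rw [alen, hr0len]
  have hFrowlen : ∀ i : Nat, i < H → (F.getD i []).length = W := by
    intro i hi; rw [arow i, hr0rowlen i hi]
  apply List.ext_getElem
  · rw [hFlen, List.length_map, PySem.List.length_pyRange_one]
    omega
  · intro i hiA hiB
    have hiH : i < H := by rwa [hFlen] at hiA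
    apply List.ext_getElem
    · rw [List.getElem_map, List.length_map, PySem.List.length_pyRange_one,
        ← List.getD_eq_getElem _ _ hiA, hFrowlen i hiH]
      omega
    · intro j hjA hjB
      have hjW : j < W := by
        rwa [← List.getD_eq_getElem _ _ hiA, hFrowlen i hiH] at hjA
      have hval := ag i j
      unfold gD at hval
      rw [List.getD_eq_getElem _ _ hiA] at hval
      rw [List.getD_eq_getElem _ _ hjA] at hval
      rw [hval]
      simp only [List.getElem_map, PySem.List.getElem_pyRange_one, zero_add,
        PySem.List.mem_pyRange_one, hr0len, hr0rowlen i hiH, hr0g]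
      by_cases hint : 1 ≤ i ∧ i + 1 < H ∧ 1 ≤ j ∧ j + 1 < W
      · rw [if_pos (by constructor; omega; constructor; omega; exact ⟨hiH, hjW⟩),
          if_pos (by omega)]
        have hWlen : ∀ row ∈ imagen, W ≤ row.length := by
          rw [hW, head_eq]
          exact hrows (by omega) (by rw [← head_eq, ← hW]; omega)
        have hmem : ∀ a : Nat, a < H → imagen.getD a [] ∈ imagen := by
          intro a ha
          rw [List.getD_eq_getElem _ _ ha]
          exact List.getElem_mem _
        exact interior_eq imagen i j hint.1 hint.2.1 hint.2.2.1
          (by have := hWlen _ (hmem (i-1) (by omega)); omega)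
          (by have := hWlen _ (hmem i (by omega)); omega)
          (by have := hWlen _ (hmem (i+1) (by omega)); omega)
      · rw [if_neg (fun h => hint (by omega)), if_neg (fun h => hint (by omega))]
        exact hr0g i j

-- ===== VERDICT (by name: the statement is the Claim_ definition above) =====
theorem aplicar_filtro_laplaciano_spec : Claim_equal_aplicar_filtro_laplaciano := by
  intro imagen _ hpre
  unfold Spec_aplicar_filtro_laplaciano
  exact A_eq_B imagen hpre
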